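-- pv_equiv track=rewrite | github.com/blegloannec/CodeProblems | CodinGame/Community/empire_enigma.py | seeded_attack
-- ===== SOURCE A (Python) =====
-- MOD = 7140
--
-- A = 7562100%MOD
--
-- B = 907598307%MOD
--
-- MASK = (1<<8)-1
--
-- def seeded_attack(C,R0,M):
--     R = R0
--     for i in range(1,len(C)):
--         R = (A*R+B)%MOD
--         m = (R&MASK)^C[i]
--         if 32<=m<=126:
--             M.append(m)
--         else:
--             return False
--     return True
-- ===== SOURCE B (Python) =====
-- MOD = 7140
-- A = 7562100 % MOD
-- B = 907598307 % MOD
-- MASK = (1 << 8) - 1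
--
-- def seeded_attack(C, R0, M):
--     # Pass 1: run the LCG once and decode the whole tail up front.
--     R = R0
--     ms = []
--     for c in C[1:]:
--         R = (A * R + B) % MOD
--         ms.append((R & MASK) ^ c)
--     # Pass 2: locate the first non-printable value, then bulk-extend M.
--     bad = next((i for i, m in enumerate(ms) if not 32 <= m <= 126), None)
--     if bad is None:
--         M.extend(ms)
--         return True
--     M.extend(ms[:bad])
--     return False
-- ===== Notes on version B (the rewrite author's own statement) =====
-- stated objective: alternative
-- what changed: Replaces A's single fused index loop (step LCG, decode, validate, append, early return) with a decode-then-validate decomposition: one pass precomputes the whole decoded tail, then a find-first-invalid scan plus a bulk M.extend of the valid prefix.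
import Mathlib
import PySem

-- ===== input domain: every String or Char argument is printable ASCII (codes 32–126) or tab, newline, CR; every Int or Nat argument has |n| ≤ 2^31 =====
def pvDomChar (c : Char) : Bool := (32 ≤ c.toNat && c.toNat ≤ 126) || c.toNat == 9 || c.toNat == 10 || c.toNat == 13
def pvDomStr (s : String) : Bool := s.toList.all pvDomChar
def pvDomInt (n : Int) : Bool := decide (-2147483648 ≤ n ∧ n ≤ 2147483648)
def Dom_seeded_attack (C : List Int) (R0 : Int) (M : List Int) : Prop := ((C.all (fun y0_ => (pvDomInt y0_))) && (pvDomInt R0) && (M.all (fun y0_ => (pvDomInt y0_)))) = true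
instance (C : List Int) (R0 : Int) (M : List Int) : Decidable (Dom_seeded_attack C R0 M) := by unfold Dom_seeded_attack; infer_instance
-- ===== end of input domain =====

-- B decodes the whole tail first, then finds the first non-printable value and bulk-extends M
-- with the valid prefix (alternative decomposition; both versions mutate M identically, the
-- theorem is about the returned Bool).


-- module-level constants of the Python file
def pvMOD : Int := 7140
def pvA : Int := PySem.Int.mod 7562100 pvMOD
def pvB : Int := PySem.Int.mod 907598307 pvMOD
def pvMASK : Int := (1 <<< 8) - 1

-- ===== PORT A =====
-- the for-loop over range(1, len(C)) with state (R, M) and early 'return False'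
def pvLoopA (C : List Int) (idxs : List Int) (R : Int) (M : List Int) : Bool :=
  match idxs with
  | [] => true
  | i :: rest =>
    let R' := PySem.Int.mod (pvA * R + pvB) pvMOD
    let m := PySem.Int.bxor (PySem.Int.band R' pvMASK) (PySem.List.pyGetD C i 0)
    if 32 ≤ m ∧ m ≤ 126 then pvLoopA C rest R' (M ++ [m]) else false

def seeded_attack (C : List Int) (R0 : Int) (M : List Int) : Bool :=
  pvLoopA C (PySem.List.pyRange 1 (C.length : Int) 1) R0 M

-- ===== PORT B =====
-- pass 1: decode C[1:] while threading the LCG state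
def pvDecode (Cs : List Int) (R : Int) : List Int :=
  match Cs with
  | [] => []
  | c :: rest =>
    let R' := PySem.Int.mod (pvA * R + pvB) pvMOD
    PySem.Int.bxor (PySem.Int.band R' pvMASK) c :: pvDecode rest R'

-- pass 2: 'next((i for i, m in enumerate(ms) if not 32 <= m <= 126), None)'
def pvFirstBad (ms : List Int) : Option Nat :=
  match ms with
  | [] => none
  | m :: rest =>
    if ¬ (32 ≤ m ∧ m ≤ 126) then some 0 else (pvFirstBad rest).map (· + 1)

def seeded_attack_alt (C : List Int) (R0 : Int) (M : List Int) : Bool :=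
  let ms := pvDecode (PySem.List.slice C (some 1) none) R0
  match pvFirstBad ms with
  | none => true          -- M.extend(ms); return True
  | some _ => false       -- M.extend(ms[:bad]); return False

-- ===== PRECONDITION & SPEC =====
def Spec_seeded_attack (C : List Int) (R0 : Int) (M : List Int) (out : Bool) : Prop := out = seeded_attack_alt C R0 M
instance (C : List Int) (R0 : Int) (M : List Int) (out : Bool) : Decidable (Spec_seeded_attack C R0 M out) := by unfold Spec_seeded_attack; infer_instance

-- ===== CLAIM (what is proved, stated in full; the proofs are below) =====
def Claim_equal_seeded_attack : Prop := ∀ (C : List Int) (R0 : Int) (M : List Int), Dom_seeded_attack C R0 M → Spec_seeded_attack C R0 M (seeded_attack C R0 M)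

-- ===== LEMMAS AND PROOFS =====

-- common reference recursion: decode-and-validate fused
def pvGo (l : List Int) (R : Int) : Bool :=
  match l with
  | [] => true
  | c :: rest =>
    let R' := PySem.Int.mod (pvA * R + pvB) pvMOD
    let m := PySem.Int.bxor (PySem.Int.band R' pvMASK) c
    if 32 ≤ m ∧ m ≤ 126 then pvGo rest R' else false

theorem pvB_eq_go (l : List Int) (R : Int) :
    (match pvFirstBad (pvDecode l R) with
     | none => true
     | some _ => false) = pvGo l R := by
  induction l generalizing R with
  | nil => rfl
  | cons c rest ih =>
    simp only [pvDecode, pvFirstBad, pvGo]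
    by_cases h : 32 ≤ PySem.Int.bxor (PySem.Int.band (PySem.Int.mod (pvA * R + pvB) pvMOD) pvMASK) c ∧
        PySem.Int.bxor (PySem.Int.band (PySem.Int.mod (pvA * R + pvB) pvMOD) pvMASK) c ≤ 126
    · rw [if_neg (by simpa using h), if_pos h, ← ih]
      cases pvFirstBad (pvDecode rest (PySem.Int.mod (pvA * R + pvB) pvMOD)) <;> rfl
    · rw [if_pos (by simpa using h), if_neg h]

theorem pvA_eq_go (C : List Int) (n : Nat) (s : Int) (R : Int) (M : List Int)
    (hs0 : 0 ≤ s) (h : s.toNat + n ≤ C.length) :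
    pvLoopA C ((List.range n).map (fun k : Nat => s + (k : Int))) R M
      = pvGo ((C.drop s.toNat).take n) R := by
  induction n generalizing s R M with
  | zero => rfl
  | succ n ih =>
    have hs : s.toNat < C.length := by omega
    have hdrop : C.drop s.toNat = C[s.toNat] :: C.drop (s.toNat + 1) :=
      (List.getElem_cons_drop hs).symm
    rw [List.range_succ_eq_map]
    simp only [List.map_cons, List.map_map]
    have hmap : ((fun k : Nat => s + (k : Int)) ∘ Nat.succ)
        = fun k : Nat => (s + 1) + (k : Int) := by
      funext k
      show s + ((k + 1 : Nat) : Int) = (s + 1) + (k : Int)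
      push_cast; ring
    rw [hmap, hdrop]
    simp only [pvLoopA, pvGo, List.take_succ_cons, Nat.cast_zero, add_zero]
    have hget : PySem.List.pyGetD C s 0 = C[s.toNat] := by
      rw [PySem.List.pyGetD_eq_getElem C 0 hs0 (by omega)]
    rw [hget]
    split
    · have h2 := ih (s + 1) (PySem.Int.mod (pvA * R + pvB) pvMOD) (M ++ [PySem.Int.bxor
        (PySem.Int.band (PySem.Int.mod (pvA * R + pvB) pvMOD) pvMASK) C[s.toNat]])
        (by omega) (by omega)
      rw [show (s + 1).toNat = s.toNat + 1 by omega] at h2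
      exact h2
    · rfl

-- ===== VERDICT (by name: the statement is the Claim_ definition above) =====
theorem seeded_attack_spec : Claim_equal_seeded_attack := by
  unfold Claim_equal_seeded_attack
  intro C R0 M _
  unfold Spec_seeded_attack seeded_attack seeded_attack_alt
  rw [PySem.List.slice_from_one, pvB_eq_go]
  cases C with
  | nil => rfl
  | cons c0 Ct =>
    rw [PySem.List.pyRange_one]
    have hlen : (((c0 :: Ct : List Int).length : Int) - 1).toNat = Ct.length := by
      simp
    rw [hlen, List.tail_cons]
    have h2 := pvA_eq_go (c0 :: Ct) Ct.length 1 R0 M (by omega)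
      (by rw [List.length_cons]; omega)
    simp only [Int.toNat_one, List.drop_succ_cons, List.drop_zero, List.take_length] at h2
    exact h2
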